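-- pv_equiv track=rewrite | github.com/worta/apty | raw/StandardizeData.py | get_choices_add
-- ===== SOURCE A (Python) =====
-- def get_choices_add(val):
--     res = {}
--     key_dict = {"Morpho- and Lexicon-based Changes":"morph","Structure-based Changes":"struct","Semantic-based Changes":"semantic","Others":"others"}
--     for a in key_dict:
--         if a in val["choices"]:
--             res[key_dict[a]] = True
--         else:
--             res[key_dict[a]] = False
--     return res
-- ===== SOURCE B (Python) =====
-- def get_choices_add(val):
--     key_dict = {"Morpho- and Lexicon-based Changes":"morph","Structure-based Changes":"struct","Semantic-based Changes":"semantic","Others":"others"}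
--     res = {name: False for name in key_dict.values()}
--     for c in val["choices"]:
--         if c in key_dict:
--             res[key_dict[c]] = True
--     return res
-- ===== Notes on version B (the rewrite author's own statement) =====
-- stated objective: idiomatic
-- what changed: B seeds the result with all four mapped names set to False and iterates once over the input's choices list marking matches True, instead of A's loop over the fixed key_dict with a membership scan of the choices list per key.
import Mathlib
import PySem

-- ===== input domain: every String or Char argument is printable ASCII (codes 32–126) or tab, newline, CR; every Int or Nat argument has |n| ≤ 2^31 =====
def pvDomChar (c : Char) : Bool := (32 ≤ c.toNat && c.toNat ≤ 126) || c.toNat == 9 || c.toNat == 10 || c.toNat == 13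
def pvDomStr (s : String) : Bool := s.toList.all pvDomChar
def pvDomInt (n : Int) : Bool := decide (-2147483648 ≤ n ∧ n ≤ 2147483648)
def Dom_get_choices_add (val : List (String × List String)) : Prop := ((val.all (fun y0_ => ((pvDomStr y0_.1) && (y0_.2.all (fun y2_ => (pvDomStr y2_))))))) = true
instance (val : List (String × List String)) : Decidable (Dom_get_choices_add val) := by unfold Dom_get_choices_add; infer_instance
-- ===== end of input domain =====

-- B seeds the result with all four mapped names set to False and then walks over val["choices"]
-- setting matches to True, instead of A's walk over the fixed key_dict with a membership test per key (objective: idiomatic).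

-- the fixed key_dict both Pythons define
def pvKeyDict : PySem.Dict String String :=
  PySem.Dict.mk [("Morpho- and Lexicon-based Changes","morph"),
                 ("Structure-based Changes","struct"),
                 ("Semantic-based Changes","semantic"),
                 ("Others","others")]

-- ===== PORT A =====
def get_choices_add (val : List (String × List String)) : List (String × Bool) :=
  match (PySem.Dict.mk val).get? "choices" with
  | none => []   -- unreachable under Pre_ (Python raises KeyError)
  | some choices =>
    (pvKeyDict.keys.foldl (fun res a =>
        if choices.contains a then res.insert (pvKeyDict.getD a "") true
        else res.insert (pvKeyDict.getD a "") false) PySem.Dict.empty).items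

-- ===== PORT B =====
def get_choices_add_alt (val : List (String × List String)) : List (String × Bool) :=
  match (PySem.Dict.mk val).get? "choices" with
  | none => []   -- unreachable under Pre_ (Python raises KeyError)
  | some choices =>
    let res0 := pvKeyDict.values.foldl (fun r name => r.insert name false) PySem.Dict.empty
    (choices.foldl (fun r c =>
        match pvKeyDict.get? c with
        | some k => r.insert k true
        | none => r) res0).items

-- ===== PRECONDITION & SPEC =====
-- Pre_ excludes exactly the inputs without a "choices" key, on which both Pythons raise KeyError.
def Pre_get_choices_add (val : List (String × List String)) : Prop :=
  "choices" ∈ val.map Prod.fst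
instance (val : List (String × List String)) : Decidable (Pre_get_choices_add val) := by
  unfold Pre_get_choices_add; infer_instance

def pvWitness_get_choices_add : (List (String × List String)) := [("choices", ["Others"])]

def Spec_get_choices_add (val : List (String × List String)) (out : List (String × Bool)) : Prop := out = get_choices_add_alt val
instance (val : List (String × List String)) (out : List (String × Bool)) : Decidable (Spec_get_choices_add val out) := by unfold Spec_get_choices_add; infer_instance

-- ===== CLAIM (what is proved, stated in full; the proofs are below) =====
def Claim_equal_get_choices_add : Prop := ∀ (val : List (String × List String)), Dom_get_choices_add val → Pre_get_choices_add val → Spec_get_choices_add val (get_choices_add val)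

-- ===== LEMMAS AND PROOFS =====

-- collapse A's two branches: writing true/false under an if is writing the condition
theorem insert_ite {κ : Type} [BEq κ] (d : PySem.Dict κ Bool) (k : κ) (b : Bool) :
    (if b then d.insert k true else d.insert k false) = d.insert k b := by
  cases b <;> rfl

-- A's loop over the four fixed keys, with the four membership bits abstracted
theorem portA_items (b1 b2 b3 b4 : Bool) (choices : List String)
    (h1 : choices.contains "Morpho- and Lexicon-based Changes" = b1)
    (h2 : choices.contains "Structure-based Changes" = b2)
    (h3 : choices.contains "Semantic-based Changes" = b3)
    (h4 : choices.contains "Others" = b4) :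
    (pvKeyDict.keys.foldl (fun res a =>
        if choices.contains a then res.insert (pvKeyDict.getD a "") true
        else res.insert (pvKeyDict.getD a "") false) PySem.Dict.empty).items =
      [("morph", b1), ("struct", b2), ("semantic", b3), ("others", b4)] := by
  simp only [pvKeyDict, PySem.Dict.keys, List.foldl, List.map, insert_ite, h1, h2, h3, h4]
  cases b1 <;> cases b2 <;> cases b3 <;> cases b4 <;> decide

-- B's loop over choices, as it transforms the four seeded entries
theorem portB_loop (cs : List String) (b1 b2 b3 b4 : Bool) :
    cs.foldl (fun r c =>
        match pvKeyDict.get? c with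
        | some k => r.insert k true
        | none => r)
      (PySem.Dict.mk [("morph", b1), ("struct", b2), ("semantic", b3), ("others", b4)]) =
    PySem.Dict.mk [("morph", b1 || cs.contains "Morpho- and Lexicon-based Changes"),
                   ("struct", b2 || cs.contains "Structure-based Changes"),
                   ("semantic", b3 || cs.contains "Semantic-based Changes"),
                   ("others", b4 || cs.contains "Others")] := by
  induction cs generalizing b1 b2 b3 b4 with
  | nil => simp
  | cons c cs ih =>
    by_cases e1 : c = "Morpho- and Lexicon-based Changes"
    · subst e1
      simp only [List.foldl_cons]
      rw [show (match pvKeyDict.get? "Morpho- and Lexicon-based Changes" with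
          | some k => (PySem.Dict.mk [("morph", b1), ("struct", b2), ("semantic", b3), ("others", b4)]).insert k true
          | none => PySem.Dict.mk [("morph", b1), ("struct", b2), ("semantic", b3), ("others", b4)]) =
          PySem.Dict.mk [("morph", true), ("struct", b2), ("semantic", b3), ("others", b4)] from rfl, ih]
      simp
    · by_cases e2 : c = "Structure-based Changes"
      · subst e2
        simp only [List.foldl_cons]
        rw [show (match pvKeyDict.get? "Structure-based Changes" with
            | some k => (PySem.Dict.mk [("morph", b1), ("struct", b2), ("semantic", b3), ("others", b4)]).insert k true
            | none => PySem.Dict.mk [("morph", b1), ("struct", b2), ("semantic", b3), ("others", b4)]) =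
            PySem.Dict.mk [("morph", b1), ("struct", true), ("semantic", b3), ("others", b4)] from rfl, ih]
        simp
      · by_cases e3 : c = "Semantic-based Changes"
        · subst e3
          simp only [List.foldl_cons]
          rw [show (match pvKeyDict.get? "Semantic-based Changes" with
              | some k => (PySem.Dict.mk [("morph", b1), ("struct", b2), ("semantic", b3), ("others", b4)]).insert k true
              | none => PySem.Dict.mk [("morph", b1), ("struct", b2), ("semantic", b3), ("others", b4)]) =
              PySem.Dict.mk [("morph", b1), ("struct", b2), ("semantic", true), ("others", b4)] from rfl, ih]
          simp
        · by_cases e4 : c = "Others"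
          · subst e4
            simp only [List.foldl_cons]
            rw [show (match pvKeyDict.get? "Others" with
                | some k => (PySem.Dict.mk [("morph", b1), ("struct", b2), ("semantic", b3), ("others", b4)]).insert k true
                | none => PySem.Dict.mk [("morph", b1), ("struct", b2), ("semantic", b3), ("others", b4)]) =
                PySem.Dict.mk [("morph", b1), ("struct", b2), ("semantic", b3), ("others", true)] from rfl, ih]
            simp
          · simp only [List.foldl_cons]
            rw [show (match pvKeyDict.get? c with
                | some k => (PySem.Dict.mk [("morph", b1), ("struct", b2), ("semantic", b3), ("others", b4)]).insert k true
                | none => PySem.Dict.mk [("morph", b1), ("struct", b2), ("semantic", b3), ("others", b4)]) =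
                PySem.Dict.mk [("morph", b1), ("struct", b2), ("semantic", b3), ("others", b4)] from by
                  have n1 : ("Morpho- and Lexicon-based Changes" == c) = false := by
                    simpa using fun h => e1 h.symm
                  have n2 : ("Structure-based Changes" == c) = false := by
                    simpa using fun h => e2 h.symm
                  have n3 : ("Semantic-based Changes" == c) = false := by
                    simpa using fun h => e3 h.symm
                  have n4 : ("Others" == c) = false := by
                    simpa using fun h => e4 h.symm
                  simp [pvKeyDict, n1, n2, n3, n4, PySem.Dict.get?], ih]
            simp [show ¬("Morpho- and Lexicon-based Changes" = c) from fun h => e1 h.symm,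
                  show ¬("Structure-based Changes" = c) from fun h => e2 h.symm,
                  show ¬("Semantic-based Changes" = c) from fun h => e3 h.symm,
                  show ¬("Others" = c) from fun h => e4 h.symm]

-- the seed of B's loop is the all-false dict
theorem portB_seed :
    pvKeyDict.values.foldl (fun r name => r.insert name false) PySem.Dict.empty =
      PySem.Dict.mk [("morph", false), ("struct", false), ("semantic", false), ("others", false)] := by
  decide

-- Pre_ means the "choices" lookup succeeds
theorem pre_get_some (val : List (String × List String)) (h : Pre_get_choices_add val) :
    ∃ cs, (PySem.Dict.mk val).get? "choices" = some cs := by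
  cases hcs : (PySem.Dict.mk val).get? "choices" with
  | some cs => exact ⟨cs, rfl⟩
  | none =>
    exfalso
    have hk : "choices" ∉ (PySem.Dict.mk val).keys :=
      (PySem.Dict.get?_eq_none_iff_not_mem_keys _ _).mp hcs
    exact hk (by simpa [PySem.Dict.keys, Pre_get_choices_add] using h)

-- ===== VERDICT (by name: the statement is the Claim_ definition above) =====
theorem get_choices_add_spec : Claim_equal_get_choices_add := by
  intro val _ hpre
  unfold Spec_get_choices_add get_choices_add get_choices_add_alt
  obtain ⟨cs, hcs⟩ := pre_get_some val hpre
  rw [hcs]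
  dsimp only
  rw [portA_items _ _ _ _ cs rfl rfl rfl rfl, portB_seed, portB_loop]
  simp
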